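-- pv_equiv track=rewrite | github.com/mik11231/python | advent2018/Day11/day11.py | solve
-- ===== SOURCE A (Python) =====
-- def power_level(x: int, y: int, serial: int) -> int:
--     """Compute the fuel-cell power level at 1-indexed coordinate (x, y)."""
--     rack_id = x + 10
--     value = (rack_id * y + serial) * rack_id
--     hundreds = (value // 100) % 10
--     return hundreds - 5
--
-- def solve(serial: int) -> str:
--     """Return the top-left coordinate of the best 3x3 square as 'x,y'."""
--     best_sum = None
--     best_xy = (0, 0)
--
--     # Only top-left positions that allow a full 3x3 window are valid.
--     for x in range(1, 299):
--         for y in range(1, 299):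
--             square_sum = 0
--             for dx in range(3):
--                 for dy in range(3):
--                     square_sum += power_level(x + dx, y + dy, serial)
--             if best_sum is None or square_sum > best_sum:
--                 best_sum = square_sum
--                 best_xy = (x, y)
--
--     return f"{best_xy[0]},{best_xy[1]}"
-- ===== SOURCE B (Python) =====
-- def power_level(x: int, y: int, serial: int) -> int:
--     """Compute the fuel-cell power level at 1-indexed coordinate (x, y)."""
--     rack_id = x + 10
--     value = (rack_id * y + serial) * rack_id
--     hundreds = (value // 100) % 10
--     return hundreds - 5
--
-- def solve(serial: int) -> str:
--     """Return the top-left coordinate of the best 3x3 square as 'x,y'.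
--
--     Separable window sum: precompute vertical 3-cell sums once, then each
--     3x3 window is the sum of just three precomputed column sums.
--     """
--     vs = [[power_level(x + 1, y + 1, serial)
--            + power_level(x + 1, y + 2, serial)
--            + power_level(x + 1, y + 3, serial)
--            for y in range(298)]
--           for x in range(300)]
--     best_sum = None
--     best_xy = (0, 0)
--     for x in range(298):
--         for y in range(298):
--             s = vs[x][y] + vs[x + 1][y] + vs[x + 2][y]
--             if best_sum is None or s > best_sum:
--                 best_sum = s
--                 best_xy = (x + 1, y + 1)
--     return f"{best_xy[0]},{best_xy[1]}"
-- ===== Notes on version B (the rewrite author's own statement) =====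
-- stated objective: faster
-- what changed: B exploits separability of the window sum: it precomputes a table of vertical three-cell column sums once, so each candidate square costs three table adds instead of nine fresh power_level evaluations.
import Mathlib
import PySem

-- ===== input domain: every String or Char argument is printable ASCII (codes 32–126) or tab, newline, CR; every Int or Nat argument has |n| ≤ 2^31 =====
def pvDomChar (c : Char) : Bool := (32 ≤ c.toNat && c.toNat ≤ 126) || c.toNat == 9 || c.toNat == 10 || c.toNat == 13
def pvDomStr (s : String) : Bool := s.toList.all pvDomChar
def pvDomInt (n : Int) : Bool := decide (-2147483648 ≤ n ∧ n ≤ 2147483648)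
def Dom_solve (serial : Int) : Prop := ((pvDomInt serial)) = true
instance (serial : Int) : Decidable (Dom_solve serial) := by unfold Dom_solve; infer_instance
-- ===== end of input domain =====

-- B precomputes vertical 3-cell column sums once so each 3x3 window is three adds
-- instead of nine power_level recomputations (constant-factor speed-up; same result).

-- ===== PORT A =====
-- helper power_level(x, y, serial), shared verbatim by Source A and Source B
def power_level (x y serial : Int) : Int :=
  let rack_id := x + 10
  let value := (rack_id * y + serial) * rack_id
  let hundreds := PySem.Int.mod (PySem.Int.floordiv value 100) 10
  hundreds - 5

def solve (serial : Int) : String :=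
  let r := (PySem.List.pyRange 1 299 1).foldl (fun st x =>
      (PySem.List.pyRange 1 299 1).foldl (fun st y =>
        let square_sum := (PySem.List.pyRange 0 3 1).foldl (fun s dx =>
            (PySem.List.pyRange 0 3 1).foldl (fun s dy =>
              s + power_level (x + dx) (y + dy) serial) s) 0
        match st.1 with
        | none => (some square_sum, (x, y))
        | some b => if square_sum > b then (some square_sum, (x, y)) else st) st)
    ((none : Option Int), ((0 : Int), (0 : Int)))
  PySem.Int.toStr r.2.1 ++ "," ++ PySem.Int.toStr r.2.2

-- ===== PORT B =====
-- Source B's nested list comprehension building the vertical 3-sum table vs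
def vsGrid (serial : Int) : List (List Int) :=
  (PySem.List.pyRange 0 300 1).map (fun x =>
    (PySem.List.pyRange 0 298 1).map (fun y =>
      power_level (x + 1) (y + 1) serial + power_level (x + 1) (y + 2) serial
        + power_level (x + 1) (y + 3) serial))

def solve_alt (serial : Int) : String :=
  let vs := vsGrid serial
  let r := (PySem.List.pyRange 0 298 1).foldl (fun st x =>
      (PySem.List.pyRange 0 298 1).foldl (fun st y =>
        let s := PySem.List.pyGetD (PySem.List.pyGetD vs x []) y 0
          + PySem.List.pyGetD (PySem.List.pyGetD vs (x + 1) []) y 0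
          + PySem.List.pyGetD (PySem.List.pyGetD vs (x + 2) []) y 0
        match st.1 with
        | none => (some s, (x + 1, y + 1))
        | some b => if s > b then (some s, (x + 1, y + 1)) else st) st)
    ((none : Option Int), ((0 : Int), (0 : Int)))
  PySem.Int.toStr r.2.1 ++ "," ++ PySem.Int.toStr r.2.2

-- ===== PRECONDITION & SPEC =====
def Spec_solve (serial : Int) (out : String) : Prop := out = solve_alt serial
instance (serial : Int) (out : String) : Decidable (Spec_solve serial out) := by unfold Spec_solve; infer_instance

-- ===== CLAIM (what is proved, stated in full; the proofs are below) =====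
def Claim_equal_solve : Prop := ∀ (serial : Int), Dom_solve serial → Spec_solve serial (solve serial)

-- ===== LEMMAS AND PROOFS =====

-- the state and shared update step of both argmax scans
def pvStep (xy : Int × Int) (s : Int) (st : Option Int × (Int × Int)) :
    Option Int × (Int × Int) :=
  match st.1 with
  | none => (some s, xy)
  | some b => if s > b then (some s, xy) else st

-- the vertical 3-sum B tabulates
def pvQ (serial x y : Int) : Int :=
  power_level (x + 1) (y + 1) serial + power_level (x + 1) (y + 2) serial
    + power_level (x + 1) (y + 3) serial

-- reading the vs table inside its bounds gives pvQ
theorem vsGrid_get (serial x y : Int) (hx0 : 0 ≤ x) (hx : x < 300)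
    (hy0 : 0 ≤ y) (hy : y < 298) :
    PySem.List.pyGetD (PySem.List.pyGetD (vsGrid serial) x []) y 0 = pvQ serial x y := by
  unfold vsGrid pvQ
  rw [PySem.List.pyGetD_map_pyRange_of_nonneg _ _ _ _ hx0 hx,
      PySem.List.pyGetD_map_pyRange_of_nonneg _ _ _ _ hy0 hy]

-- A's 3x3 inner double loop at (x, y) equals the three column sums B adds at (x-1, y-1)
theorem scoreA_eq_scoreB (serial x y : Int) :
    (PySem.List.pyRange 0 3 1).foldl (fun s dx =>
        (PySem.List.pyRange 0 3 1).foldl (fun s dy =>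
          s + power_level (x + dx) (y + dy) serial) s) 0
      = pvQ serial (x - 1) (y - 1) + pvQ serial x (y - 1) + pvQ serial (x + 1) (y - 1) := by
  have h3 : PySem.List.pyRange 0 3 1 = [0, 1, 2] := by decide
  rw [h3]
  simp only [List.foldl, pvQ]
  ring_nf

set_option maxRecDepth 8192 in
theorem solve_eq_alt (serial : Int) : solve serial = solve_alt serial := by
  unfold solve solve_alt
  have hkey :
      (PySem.List.pyRange 1 299 1).foldl (fun st x =>
        (PySem.List.pyRange 1 299 1).foldl (fun st y =>
          pvStep (x, y)
            ((PySem.List.pyRange 0 3 1).foldl (fun s dx =>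
              (PySem.List.pyRange 0 3 1).foldl (fun s dy =>
                s + power_level (x + dx) (y + dy) serial) s) 0) st) st)
        ((none : Option Int), ((0 : Int), (0 : Int)))
      = (PySem.List.pyRange 0 298 1).foldl (fun st x =>
        (PySem.List.pyRange 0 298 1).foldl (fun st y =>
          pvStep (x + 1, y + 1)
            (PySem.List.pyGetD (PySem.List.pyGetD (vsGrid serial) x []) y 0
              + PySem.List.pyGetD (PySem.List.pyGetD (vsGrid serial) (x + 1) []) y 0
              + PySem.List.pyGetD (PySem.List.pyGetD (vsGrid serial) (x + 2) []) y 0) st) st)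
        ((none : Option Int), ((0 : Int), (0 : Int))) := by
    -- rewrite B's table reads to pvQ, then shift A's index range by 1
    rw [PySem.List.foldl_congr_mem (PySem.List.pyRange 0 298 1) _
      (fun st x => (PySem.List.pyRange 0 298 1).foldl (fun st y =>
          pvStep (x + 1, y + 1)
            (pvQ serial x y + pvQ serial (x + 1) y + pvQ serial (x + 2) y) st) st) _ ?_]
    · rw [PySem.List.pyRange_one 1 299, PySem.List.pyRange_one 0 298,
        List.foldl_map, List.foldl_map]
      have h298 : ((299 : Int) - 1).toNat = ((298 : Int) - 0).toNat := by decide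
      rw [h298]
      apply PySem.List.foldl_congr_mem
      intro st k _
      rw [List.foldl_map, List.foldl_map]
      apply PySem.List.foldl_congr_mem
      intro st j _
      rw [scoreA_eq_scoreB]
      ring_nf
    · intro st x hx
      rw [PySem.List.mem_pyRange_one] at hx
      apply PySem.List.foldl_congr_mem
      intro st' y hy
      rw [PySem.List.mem_pyRange_one] at hy
      rw [vsGrid_get serial x y hx.1 (by omega) hy.1 hy.2,
        vsGrid_get serial (x + 1) y (by omega) (by omega) hy.1 hy.2,
        vsGrid_get serial (x + 2) y (by omega) (by omega) hy.1 hy.2]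
  exact congrArg
    (fun r : Option Int × (Int × Int) =>
      PySem.Int.toStr r.2.1 ++ "," ++ PySem.Int.toStr r.2.2) hkey

-- ===== VERDICT (by name: the statement is the Claim_ definition above) =====
theorem solve_spec : Claim_equal_solve := by
  intro serial _
  unfold Spec_solve
  exact solve_eq_alt serial
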